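-- pv_equiv track=rewrite | github.com/babyblueviper1/Viper-Stack-Omega | ordinals/ordinals.py | bech32_decode
-- ===== SOURCE A (Python) =====
-- CHARSET = "qpzry9x8gf2tvdw0s3jn54khce6mua7l"
--
-- def bech32_polymod(values):
--     GEN = [0x3b6a57b2, 0x26508e6d, 0x1ea119fa, 0x3d4233dd, 0x2a1462b3]
--     chk = 1
--     for v in values:
--         b = (chk >> 25)
--         chk = (chk & 0x1ffffff) << 5 ^ v
--         for i in range(5):
--             chk ^= GEN[i] if ((b >> i) & 1) else 0
--     return chk
--
-- def bech32_hrp_expand(s):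
--     return [ord(x) >> 5 for x in s] + [0] + [ord(x) & 31 for x in s]
--
-- def bech32_verify_checksum(hrp, data):
--     return bech32_polymod(bech32_hrp_expand(hrp) + data) == 1
--
-- def bech32m_verify_checksum(hrp, data):
--     return bech32_polymod(bech32_hrp_expand(hrp) + data) == 0x2bc830a3  # Bech32m constant
--
-- def bech32_decode(addr):
--     if ' ' in addr or len(addr) < 8:
--         return None, None
--     pos = addr.rfind('1')
--     if pos < 1 or pos + 7 > len(addr) or len(addr) > 90:
--         return None, None
--     hrp = addr[:pos]
--     if not all(ord(x) >> 8 == 0 for x in hrp) or not all(ord(x) >> 8 == 0 for x in addr[pos+1:]):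
--         return None, None
--     data = []
--     for char in addr[pos+1:]:
--         value = CHARSET.find(char)
--         if value == -1:
--             return None, None
--         data.append(value)
--     # Route to Bech32 or Bech32m based on first char after '1' ('q' = v0, 'p' = v1 Taproot)
--     if addr[pos+1] == 'q':
--         if not bech32_verify_checksum(hrp, data):
--             return None, None
--     elif addr[pos+1] == 'p':
--         if not bech32m_verify_checksum(hrp, data):
--             return None, None
--     else:
--         return None, None
--     return hrp, data[:-6]
-- ===== SOURCE B (Python) =====
-- CHARSET = "qpzry9x8gf2tvdw0s3jn54khce6mua7l"
-- _CHARMAP = {c: i for i, c in enumerate(CHARSET)}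
--
-- def _gf32_mul(a, b):
--     # carry-less multiply in GF(32) = GF(2)[x]/(x^5 + x^3 + 1)
--     r = 0
--     for _ in range(5):
--         if b & 1:
--             r ^= a
--         b >>= 1
--         a <<= 1
--         if a & 32:
--             a ^= 0b101001
--     return r
--
-- def _polymod(values):
--     # checksum state kept as the six GF(32) coefficients of a degree-5
--     # polynomial; one step = multiply by x and reduce by the generator
--     # g(x) = x^6 + 29x^5 + 22x^4 + 20x^3 + 21x^2 + 29x + 18
--     c0, c1, c2, c3, c4, c5 = 0, 0, 0, 0, 0, 1
--     for v in values:
--         b = c0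
--         c0 = c1 ^ _gf32_mul(b, 29)
--         c1 = c2 ^ _gf32_mul(b, 22)
--         c2 = c3 ^ _gf32_mul(b, 20)
--         c3 = c4 ^ _gf32_mul(b, 21)
--         c4 = c5 ^ _gf32_mul(b, 29)
--         c5 = v ^ _gf32_mul(b, 18)
--     return (c0 << 25) ^ (c1 << 20) ^ (c2 << 15) ^ (c3 << 10) ^ (c4 << 5) ^ c5
--
-- def bech32_decode(addr):
--     if ' ' in addr or not (8 <= len(addr) <= 90):
--         return None, None
--     pos = addr.rfind('1')
--     if pos < 1 or len(addr) - pos < 7: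
--         return None, None
--     hrp, tail = addr[:pos], addr[pos + 1:]
--     try:
--         data = [_CHARMAP[c] for c in tail]
--     except KeyError:
--         return None, None
--     const = {'q': 1, 'p': 0x2bc830a3}.get(tail[0])
--     if const is None:
--         return None, None
--     values = [ord(x) >> 5 for x in hrp] + [0] + [ord(x) & 31 for x in hrp] + data
--     if _polymod(values) != const:
--         return None, None
--     return hrp, data[:-6]
-- ===== Notes on version B (the rewrite author's own statement) =====
-- stated objective: alternative
-- what changed: The checksum engine is rewritten on a different representation: instead of A's packed 30-bit integer with an inner 5-iteration conditional-XOR loop over magic constants, B keeps the six GF(32) coefficients of the checksum polynomial explicitly and performs one multiply-by-x-and-reduce step per symbol using a carry-less GF(32) multiplication by the generator coefficients g(x)=x^6+29x^5+22x^4+20x^3+21x^2+29x+18; the charset scan is replaced by a dict built once and the guards are folded into range checks.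
import Mathlib
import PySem

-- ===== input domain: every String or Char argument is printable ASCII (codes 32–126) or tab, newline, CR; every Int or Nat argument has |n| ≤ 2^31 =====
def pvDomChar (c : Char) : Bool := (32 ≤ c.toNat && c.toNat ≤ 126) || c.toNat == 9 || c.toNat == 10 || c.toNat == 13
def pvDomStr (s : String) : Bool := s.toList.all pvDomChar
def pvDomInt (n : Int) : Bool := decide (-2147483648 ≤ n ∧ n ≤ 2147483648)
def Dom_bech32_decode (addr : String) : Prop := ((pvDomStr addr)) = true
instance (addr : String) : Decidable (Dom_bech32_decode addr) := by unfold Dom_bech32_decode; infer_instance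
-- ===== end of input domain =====

-- B replaces A's packed-30-bit polymod (inner 5-bit conditional-XOR loop with magic
-- constants) by explicit GF(32) field arithmetic: the checksum state is the six
-- field coefficients of a degree-5 polynomial, one step multiplies by x and reduces
-- by the generator g(x) = x^6+29x^5+22x^4+20x^3+21x^2+29x+18 using a carry-less
-- gf32_mul; the charset scan is replaced by a dict built once (objective: alternative).

-- ===== PORT A =====
def CHARSET : String := "qpzry9x8gf2tvdw0s3jn54khce6mua7l"

def GEN : List Int := [0x3b6a57b2, 0x26508e6d, 0x1ea119fa, 0x3d4233dd, 0x2a1462b3]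

def bech32_polymod (values : List Int) : Int :=
  values.foldl (fun chk v =>
    let b := chk >>> 25
    let chk1 : Int := PySem.Int.bxor ((PySem.Int.band chk 0x1ffffff) <<< 5) v
    (List.range 5).foldl (fun c (i : Nat) =>
      PySem.Int.bxor c
        (if PySem.Int.band (b >>> i) 1 ≠ 0 then PySem.List.pyGetD GEN (i : Int) 0 else 0)) chk1) 1

def bech32_hrp_expand (s : String) : List Int :=
  s.toList.map (fun x => ((x.toNat : Int) >>> 5)) ++ [0] ++
    s.toList.map (fun x => PySem.Int.band (x.toNat : Int) 31)

def bech32_verify_checksum (hrp : String) (data : List Int) : Bool :=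
  bech32_polymod (bech32_hrp_expand hrp ++ data) == 1

def bech32m_verify_checksum (hrp : String) (data : List Int) : Bool :=
  bech32_polymod (bech32_hrp_expand hrp ++ data) == 0x2bc830a3

-- A's data-collecting loop body (early return modelled by an Option accumulator)
def findStep (acc : Option (List Int)) (char : Char) : Option (List Int) :=
  match acc with
  | none => none
  | some data =>
    let value := PySem.Str.find CHARSET (String.singleton char)
    if value == -1 then none else some (data ++ [value])

def bech32_decode (addr : String) : Option String × Option (List Int) :=
  if PySem.Str.isIn " " addr || PySem.Str.len addr < 8 then (none, none)
  else
    let pos := PySem.Str.rfind addr "1"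
    if pos < 1 || pos + 7 > PySem.Str.len addr || PySem.Str.len addr > 90 then (none, none)
    else
      let hrp := PySem.Str.slice addr none (some pos)
      let post := PySem.Str.slice addr (some (pos + 1)) none
      if !(hrp.toList.all fun x => ((x.toNat : Int) >>> 8) == 0) ||
         !(post.toList.all fun x => ((x.toNat : Int) >>> 8) == 0) then (none, none)
      else
        match post.toList.foldl findStep (some []) with
        | none => (none, none)
        | some data =>
          if PySem.Str.pyGet? addr (pos + 1) == some 'q' then
            if !(bech32_verify_checksum hrp data) then (none, none)
            else (some hrp, some (PySem.List.slice data none (some (-6))))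
          else if PySem.Str.pyGet? addr (pos + 1) == some 'p' then
            if !(bech32m_verify_checksum hrp data) then (none, none)
            else (some hrp, some (PySem.List.slice data none (some (-6))))
          else (none, none)

-- ===== PORT B =====
def CHARMAP : PySem.Dict Char Int :=
  (PySem.List.enumerate CHARSET.toList 0).foldl (fun d p => d.insert p.2 p.1) PySem.Dict.empty

-- carry-less multiply in GF(32) = GF(2)[x]/(x^5 + x^3 + 1)
def gf32_mul (a b : Int) : Int :=
  ((List.range 5).foldl (fun (s : Int × Int × Int) (_ : Nat) =>
    let r := if PySem.Int.band s.2.2 1 ≠ 0 then PySem.Int.bxor s.1 s.2.1 else s.1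
    let b := s.2.2 >>> 1
    let a := s.2.1 <<< 1
    let a := if PySem.Int.band a 32 ≠ 0 then PySem.Int.bxor a 41 else a
    (r, a, b)) (0, a, b)).1

-- checksum state = six GF(32) coefficients of a degree-5 polynomial
def polymod_alt (values : List Int) : Int :=
  let s := values.foldl
    (fun (c : Int × Int × Int × Int × Int × Int) (v : Int) =>
      let b := c.1
      (PySem.Int.bxor c.2.1 (gf32_mul b 29),
       PySem.Int.bxor c.2.2.1 (gf32_mul b 22),
       PySem.Int.bxor c.2.2.2.1 (gf32_mul b 20),
       PySem.Int.bxor c.2.2.2.2.1 (gf32_mul b 21),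
       PySem.Int.bxor c.2.2.2.2.2 (gf32_mul b 29),
       PySem.Int.bxor v (gf32_mul b 18)))
    ((0 : Int), (0 : Int), (0 : Int), (0 : Int), (0 : Int), (1 : Int))
  PySem.Int.bxor (PySem.Int.bxor (PySem.Int.bxor (PySem.Int.bxor (PySem.Int.bxor
    (s.1 <<< 25) (s.2.1 <<< 20)) (s.2.2.1 <<< 15)) (s.2.2.2.1 <<< 10))
    (s.2.2.2.2.1 <<< 5)) s.2.2.2.2.2

def ROUTE : PySem.Dict Char Int :=
  ((PySem.Dict.empty : PySem.Dict Char Int).insert 'q' 1).insert 'p' 0x2bc830a3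

def bech32_decode_alt (addr : String) : Option String × Option (List Int) :=
  if PySem.Str.isIn " " addr ||
     !(decide (8 ≤ PySem.Str.len addr ∧ PySem.Str.len addr ≤ 90)) then (none, none)
  else
    let pos := PySem.Str.rfind addr "1"
    if pos < 1 || PySem.Str.len addr - pos < 7 then (none, none)
    else
      let hrp := PySem.Str.slice addr none (some pos)
      let post := PySem.Str.slice addr (some (pos + 1)) none
      match post.toList.mapM (fun c => CHARMAP.get? c) with
      | none => (none, none)
      | some data =>
        match PySem.Str.pyGet? post 0 with  -- post is nonempty here; guarded for totality
        | none => (none, none)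
        | some t0 =>
          match ROUTE.get? t0 with
          | none => (none, none)
          | some const =>
            let values := hrp.toList.map (fun x => ((x.toNat : Int) >>> 5)) ++ [0] ++
              hrp.toList.map (fun x => PySem.Int.band (x.toNat : Int) 31) ++ data
            if polymod_alt values ≠ const then (none, none)
            else (some hrp, some (PySem.List.slice data none (some (-6))))

-- ===== PRECONDITION & SPEC =====
def Spec_bech32_decode (addr : String) (out : Option String × Option (List Int)) : Prop := out = bech32_decode_alt addr
instance (addr : String) (out : Option String × Option (List Int)) : Decidable (Spec_bech32_decode addr out) := by unfold Spec_bech32_decode; infer_instance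

-- ===== CLAIM (what is proved, stated in full; the proofs are below) =====
def Claim_equal_bech32_decode : Prop := ∀ (addr : String), Dom_bech32_decode addr → Spec_bech32_decode addr (bech32_decode addr)

-- ===== LEMMAS AND PROOFS =====

theorem findStep_none (cs : List Char) : cs.foldl findStep none = none := by
  induction cs with
  | nil => rfl
  | cons c cs ih => simpa [findStep] using ih

theorem charsetList : CHARSET.toList =
    ['q','p','z','r','y','9','x','8','g','f','2','t','v','d','w','0',
     's','3','j','n','5','4','k','h','c','e','6','m','u','a','7','l'] := by decide

-- CHARSET.find on a single char agrees with the dict lookup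
set_option maxHeartbeats 1000000 in
theorem charLook (c : Char) :
    PySem.Str.find CHARSET (String.singleton c) = (CHARMAP.get? c).getD (-1) := by
  by_cases hc : c ∈ CHARSET.toList
  · rw [charsetList] at hc
    fin_cases hc <;> decide
  · have h1 : PySem.Str.find CHARSET (String.singleton c) = -1 := by
      rw [PySem.Str.find_eq_neg_one_iff]
      intro h
      exact hc ((List.singleton_infix_iff c CHARSET.toList).mp (by simpa using h))
    have h2 : CHARMAP.get? c = none := by
      rw [PySem.Dict.get?_eq_none_iff_not_mem_keys]
      have hk : CHARMAP.keys = CHARSET.toList := by decide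
      rw [hk]; exact hc
    rw [h1, h2]; rfl

-- dict values are the charset indices, all in [0, 32)
theorem charBound (c : Char) (v : Int) (h : CHARMAP.get? c = some v) : 0 ≤ v ∧ v < 32 := by
  have hm := PySem.Dict.mem_items_of_get?_eq_some _ h
  have hv : v ∈ CHARMAP.values := by
    have := List.mem_map_of_mem (f := Prod.snd) hm
    simpa [PySem.Dict.values] using this
  exact (by decide : ∀ x ∈ CHARMAP.values, 0 ≤ x ∧ x < 32) v hv

-- A's fold with early-exit = B's mapM over the dict
theorem dataEq (cs : List Char) (acc : List Int) :
    cs.foldl findStep (some acc) =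
      (cs.mapM (fun c => CHARMAP.get? c)).map (fun l => acc ++ l) := by
  induction cs generalizing acc with
  | nil => simp
  | cons c cs ih =>
    rcases hc : CHARMAP.get? c with _ | v
    · have hf : PySem.Chars.find CHARSET.toList [c] = -1 := by
        have h := charLook c
        rw [hc] at h
        simpa using h
      have h1 : findStep (some acc) c = none := by simp [findStep, hf]
      simp only [List.foldl_cons, List.mapM_cons, hc, h1, findStep_none]
      rfl
    · obtain ⟨hv0, hv32⟩ := charBound c v hc
      have hf : PySem.Chars.find CHARSET.toList [c] = v := by
        have h := charLook c
        rw [hc] at h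
        simpa using h
      have hne : (v == (-1 : Int)) = false := by simp; omega
      have h1 : findStep (some acc) c = some (acc ++ [v]) := by
        simp [findStep, hf, hne]
      simp only [List.foldl_cons, List.mapM_cons, hc, h1, ih]
      rcases hm : cs.mapM (fun c => CHARMAP.get? c) with _ | l
      · rfl
      · simp

theorem dataBound (cs : List Char) (data : List Int)
    (h : cs.mapM (fun c => CHARMAP.get? c) = some data) :
    ∀ v ∈ data, 0 ≤ v ∧ v < 32 := by
  induction cs generalizing data with
  | nil =>
    simp only [List.mapM_nil, Option.pure_def, Option.some.injEq] at h
    subst h; simp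
  | cons c cs ih =>
    rw [List.mapM_cons] at h
    rcases hc : CHARMAP.get? c with _ | v0
    · rw [hc] at h; simp at h
    · rw [hc] at h
      rcases hm : cs.mapM (fun c => CHARMAP.get? c) with _ | l
      · rw [hm] at h; simp at h
      · rw [hm] at h
        simp at h
        subst h
        intro v hv
        rcases List.mem_cons.mp hv with rfl | hv
        · exact charBound c v hc
        · exact ih l hm v hv

-- ---- bit-packing toolkit for the GF(32) coefficient view ----

def pack6N (a b c d e f : Nat) : Nat :=
  a <<< 25 ^^^ b <<< 20 ^^^ c <<< 15 ^^^ d <<< 10 ^^^ e <<< 5 ^^^ f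

def mulN (k : Nat) (g : Int) : Nat := (gf32_mul (k : Int) g).toNat

def TgN (k : Nat) : Nat :=
  pack6N (mulN k 29) (mulN k 22) (mulN k 20) (mulN k 21) (mulN k 29) (mulN k 18)

theorem shl_xor_add (a b k : Nat) (hb : b < 2 ^ k) : a <<< k ^^^ b = a <<< k + b := by
  rw [Nat.shiftLeft_add_eq_or_of_lt hb]
  apply Nat.eq_of_testBit_eq
  intro j
  by_cases hj : k ≤ j
  · have hbf : b.testBit j = false :=
      Nat.testBit_lt_two_pow (lt_of_lt_of_le hb (Nat.pow_le_pow_right (by norm_num) hj))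
    simp [Nat.testBit_xor, Nat.testBit_or, hbf]
  · have hsf : (a <<< k).testBit j = false := by
      simp [Nat.testBit_shiftLeft, hj]
    simp [Nat.testBit_xor, Nat.testBit_or, hsf]

theorem pack6_add {a b c d e f : Nat} (hb : b < 32) (hc : c < 32)
    (hd : d < 32) (he : e < 32) (hf : f < 32) :
    pack6N a b c d e f =
      a * 2 ^ 25 + b * 2 ^ 20 + c * 2 ^ 15 + d * 2 ^ 10 + e * 2 ^ 5 + f := by
  have e5 : e <<< 5 = e * 2 ^ 5 := Nat.shiftLeft_eq e 5
  have d10 : d <<< 10 = d * 2 ^ 10 := Nat.shiftLeft_eq d 10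
  have c15 : c <<< 15 = c * 2 ^ 15 := Nat.shiftLeft_eq c 15
  have b20 : b <<< 20 = b * 2 ^ 20 := Nat.shiftLeft_eq b 20
  have a25 : a <<< 25 = a * 2 ^ 25 := Nat.shiftLeft_eq a 25
  have h1 : e <<< 5 ^^^ f = e <<< 5 + f := shl_xor_add e f 5 (by omega)
  have h2 : d <<< 10 ^^^ (e <<< 5 + f) = d <<< 10 + (e <<< 5 + f) :=
    shl_xor_add d _ 10 (by rw [e5]; omega)
  have h3 : c <<< 15 ^^^ (d <<< 10 + (e <<< 5 + f)) = c <<< 15 + (d <<< 10 + (e <<< 5 + f)) :=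
    shl_xor_add c _ 15 (by rw [d10, e5]; omega)
  have h4 : b <<< 20 ^^^ (c <<< 15 + (d <<< 10 + (e <<< 5 + f)))
      = b <<< 20 + (c <<< 15 + (d <<< 10 + (e <<< 5 + f))) :=
    shl_xor_add b _ 20 (by rw [c15, d10, e5]; omega)
  have h5 : a <<< 25 ^^^ (b <<< 20 + (c <<< 15 + (d <<< 10 + (e <<< 5 + f))))
      = a <<< 25 + (b <<< 20 + (c <<< 15 + (d <<< 10 + (e <<< 5 + f)))) :=
    shl_xor_add a _ 25 (by rw [b20, c15, d10, e5]; omega)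
  unfold pack6N
  simp only [Nat.xor_assoc]
  rw [h1, h2, h3, h4, h5, a25, b20, c15, d10, e5]
  ring

theorem bool12 (a b c d e f a' b' c' d' e' f' : Bool) :
    (a ^^ (a' ^^ (b ^^ (b' ^^ (c ^^ (c' ^^ (d ^^ (d' ^^ (e ^^ (e' ^^ (f ^^ f')))))))))))
      = (a ^^ (b ^^ (c ^^ (d ^^ (e ^^ (f ^^ (a' ^^ (b' ^^ (c' ^^ (d' ^^ (e' ^^ f'))))))))))) := by
  cases a <;> cases b <;> cases c <;> cases d <;> cases e <;> cases f <;>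
    cases a' <;> cases b' <;> cases c' <;> cases d' <;> cases e' <;> cases f' <;> rfl

theorem pack6_xor (a b c d e f a' b' c' d' e' f' : Nat) :
    pack6N (a ^^^ a') (b ^^^ b') (c ^^^ c') (d ^^^ d') (e ^^^ e') (f ^^^ f')
      = pack6N a b c d e f ^^^ pack6N a' b' c' d' e' f' := by
  unfold pack6N
  rw [Nat.shiftLeft_xor_distrib, Nat.shiftLeft_xor_distrib, Nat.shiftLeft_xor_distrib,
    Nat.shiftLeft_xor_distrib, Nat.shiftLeft_xor_distrib]
  apply Nat.eq_of_testBit_eq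
  intro i
  simp only [Nat.xor_assoc, Nat.testBit_xor]
  exact bool12 _ _ _ _ _ _ _ _ _ _ _ _

theorem xor_lt_32 {a b : Nat} (ha : a < 32) (hb : b < 32) : a ^^^ b < 32 := by
  have h : a ^^^ b < 2 ^ 5 := Nat.xor_lt_two_pow (by omega) (by omega)
  omega

theorem pack6_shiftRight {a b c d e f : Nat} (hb : b < 32) (hc : c < 32)
    (hd : d < 32) (he : e < 32) (hf : f < 32) :
    pack6N a b c d e f >>> 25 = a := by
  rw [pack6_add hb hc hd he hf, Nat.shiftRight_eq_div_pow]
  omega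

theorem pack6_mask {a b c d e f : Nat} (hb : b < 32) (hc : c < 32)
    (hd : d < 32) (he : e < 32) (hf : f < 32) {m : Nat} (hm : m < 32) :
    ((pack6N a b c d e f &&& 0x1ffffff) <<< 5) ^^^ m = pack6N b c d e f m := by
  have hmask : (0x1ffffff : Nat) = 2 ^ 25 - 1 := by norm_num
  rw [hmask, Nat.and_two_pow_sub_one_eq_mod, pack6_add hb hc hd he hf]
  have hmod : (a * 2 ^ 25 + b * 2 ^ 20 + c * 2 ^ 15 + d * 2 ^ 10 + e * 2 ^ 5 + f) % 2 ^ 25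
      = b * 2 ^ 20 + c * 2 ^ 15 + d * 2 ^ 10 + e * 2 ^ 5 + f := by omega
  rw [hmod, shl_xor_add _ m 5 (by omega), pack6_add hc hd he hf hm,
    Nat.shiftLeft_eq]
  ring

-- every GF(32) product of a 5-bit value with a generator coefficient is again 5 bits
theorem gfFact : ∀ k ∈ List.range 32,
    ∀ g ∈ ([29, 22, 20, 21, 29, 18] : List Int),
      0 ≤ gf32_mul (k : Int) g ∧ gf32_mul (k : Int) g < 32 := by decide

theorem gfCast (k : Nat) (hk : k < 32) (g : Int)
    (hg : g ∈ ([29, 22, 20, 21, 29, 18] : List Int)) :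
    gf32_mul (k : Int) g = ((mulN k g : Nat) : Int) ∧ mulN k g < 32 := by
  obtain ⟨h0, h32⟩ := gfFact k (List.mem_range.mpr hk) g hg
  refine ⟨(Int.toNat_of_nonneg h0).symm, ?_⟩
  unfold mulN
  omega

theorem genNonneg (i : Nat) : 0 ≤ PySem.List.pyGetD GEN ((i : Nat) : Int) 0 := by
  rw [PySem.List.pyGetD_natCast]
  by_cases hi : i < 5
  · exact (by decide : ∀ x ∈ List.range 5, 0 ≤ GEN.getD x 0) i (List.mem_range.mpr hi)
  · have h5 : GEN.length = 5 := by decide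
    rw [List.getD_eq_default _ _ (by omega)]

theorem tNonneg (b : Int) (i : Nat) :
    0 ≤ (if PySem.Int.band (b >>> i) 1 ≠ 0 then PySem.List.pyGetD GEN ((i : Nat) : Int) 0
         else 0) := by
  split
  · exact genNonneg i
  · norm_num

theorem chainX (X : Nat) (t : Int) (h : 0 ≤ t) :
    PySem.Int.bxor ((X : Nat) : Int) t = ((X ^^^ t.toNat : Nat) : Int) := by
  conv_lhs => rw [← Int.toNat_of_nonneg h]
  exact_mod_cast PySem.Int.bxor_natCast X t.toNat

-- A's 5-iteration conditional-XOR loop = the packed GF(32) products of b with the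
-- generator coefficients, for every 5-bit b and start ↑X
set_option maxHeartbeats 1000000 in
theorem innerA (k X : Nat) (hk : k < 32) :
    (List.range 5).foldl
      (fun c (i : Nat) =>
        PySem.Int.bxor c
          (if PySem.Int.band (((k : Nat) : Int) >>> i) 1 ≠ 0 then PySem.List.pyGetD GEN (i : Int) 0
           else 0))
      ((X : Nat) : Int)
      = ((X ^^^ TgN k : Nat) : Int) := by
  rw [show List.range 5 = [0, 1, 2, 3, 4] from rfl]
  simp only [List.foldl_cons, List.foldl_nil]
  rw [chainX X _ (tNonneg _ 0), chainX _ _ (tNonneg _ 1), chainX _ _ (tNonneg _ 2),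
    chainX _ _ (tNonneg _ 3), chainX _ _ (tNonneg _ 4)]
  rw [Nat.cast_inj]
  simp only [Nat.xor_assoc]
  congr 1
  interval_cases k <;> decide

theorem castShl (a k : Nat) : ((a : Int) <<< ((k : Nat) : Int)) = ((a <<< k : Nat) : Int) :=
  Int.shiftLeft_natCast a k

theorem packI_natCast (a b c d e f : Nat) :
    PySem.Int.bxor (PySem.Int.bxor (PySem.Int.bxor (PySem.Int.bxor (PySem.Int.bxor
        (((a : Nat) : Int) <<< 25) (((b : Nat) : Int) <<< 20)) (((c : Nat) : Int) <<< 15))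
        (((d : Nat) : Int) <<< 10)) (((e : Nat) : Int) <<< 5)) ((f : Nat) : Int)
      = ((pack6N a b c d e f : Nat) : Int) := by
  unfold pack6N
  rw [show ((25 : Int)) = ((25 : Nat) : Int) from rfl, show ((20 : Int)) = ((20 : Nat) : Int) from rfl,
    show ((15 : Int)) = ((15 : Nat) : Int) from rfl, show ((10 : Int)) = ((10 : Nat) : Int) from rfl,
    show ((5 : Int)) = ((5 : Nat) : Int) from rfl]
  rw [castShl, castShl, castShl, castShl, castShl]
  rw [PySem.Int.bxor_natCast, PySem.Int.bxor_natCast, PySem.Int.bxor_natCast,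
    PySem.Int.bxor_natCast, PySem.Int.bxor_natCast]

-- the shared loop: A's packed chk tracks the pack of B's coefficient 6-tuple
set_option maxHeartbeats 1000000 in
theorem polymod_loop (values : List Int) : ∀ (n0 n1 n2 n3 n4 n5 : Nat),
    n0 < 32 → n1 < 32 → n2 < 32 → n3 < 32 → n4 < 32 → n5 < 32 →
    (∀ v ∈ values, 0 ≤ v ∧ v < 32) →
    values.foldl (fun (chk : Int) (v : Int) =>
        let b := chk >>> 25
        let chk1 : Int := PySem.Int.bxor ((PySem.Int.band chk 0x1ffffff) <<< 5) v
        (List.range 5).foldl (fun c (i : Nat) =>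
          PySem.Int.bxor c
            (if PySem.Int.band (b >>> i) 1 ≠ 0 then PySem.List.pyGetD GEN (i : Int) 0 else 0)) chk1)
      ((pack6N n0 n1 n2 n3 n4 n5 : Nat) : Int)
    = (fun (s : Int × Int × Int × Int × Int × Int) =>
        PySem.Int.bxor (PySem.Int.bxor (PySem.Int.bxor (PySem.Int.bxor (PySem.Int.bxor
          (s.1 <<< 25) (s.2.1 <<< 20)) (s.2.2.1 <<< 15)) (s.2.2.2.1 <<< 10))
          (s.2.2.2.2.1 <<< 5)) s.2.2.2.2.2)
      (values.foldl
        (fun (c : Int × Int × Int × Int × Int × Int) (v : Int) =>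
          let b := c.1
          (PySem.Int.bxor c.2.1 (gf32_mul b 29),
           PySem.Int.bxor c.2.2.1 (gf32_mul b 22),
           PySem.Int.bxor c.2.2.2.1 (gf32_mul b 20),
           PySem.Int.bxor c.2.2.2.2.1 (gf32_mul b 21),
           PySem.Int.bxor c.2.2.2.2.2 (gf32_mul b 29),
           PySem.Int.bxor v (gf32_mul b 18)))
        (((n0 : Nat) : Int), ((n1 : Nat) : Int), ((n2 : Nat) : Int), ((n3 : Nat) : Int),
         ((n4 : Nat) : Int), ((n5 : Nat) : Int))) := by
  induction values with
  | nil =>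
    intro n0 n1 n2 n3 n4 n5 h0 h1 h2 h3 h4 h5 _
    simp only [List.foldl_nil]
    exact (packI_natCast n0 n1 n2 n3 n4 n5).symm
  | cons v vs ih =>
    intro n0 n1 n2 n3 n4 n5 h0 h1 h2 h3 h4 h5 hv
    obtain ⟨hv0, hv32⟩ := hv v List.mem_cons_self
    set m := v.toNat with hmdef
    have hvc : v = (m : Int) := (Int.toNat_of_nonneg hv0).symm
    have hm32 : m < 32 := by omega
    -- the six GF(32) products of n0 with the generator coefficients
    obtain ⟨hg0, hb0⟩ := gfCast n0 h0 29 (by simp)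
    obtain ⟨hg1, hb1⟩ := gfCast n0 h0 22 (by simp)
    obtain ⟨hg2, hb2⟩ := gfCast n0 h0 20 (by simp)
    obtain ⟨hg3, hb3⟩ := gfCast n0 h0 21 (by simp)
    obtain ⟨hg5, hb5⟩ := gfCast n0 h0 18 (by simp)
    -- A's step
    have hshr : ((pack6N n0 n1 n2 n3 n4 n5 : Nat) : Int) >>> 25 = ((n0 : Nat) : Int) := by
      rw [show ((pack6N n0 n1 n2 n3 n4 n5 : Nat) : Int) >>> 25
            = ((pack6N n0 n1 n2 n3 n4 n5 >>> 25 : Nat) : Int)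
          from (Int.natCast_shiftRight _ 25).symm,
        pack6_shiftRight h1 h2 h3 h4 h5]
    have hchk1 : PySem.Int.bxor
        ((PySem.Int.band ((pack6N n0 n1 n2 n3 n4 n5 : Nat) : Int) 0x1ffffff) <<< 5) v
        = ((pack6N n1 n2 n3 n4 n5 m : Nat) : Int) := by
      have hband : PySem.Int.band ((pack6N n0 n1 n2 n3 n4 n5 : Nat) : Int) 0x1ffffff
          = ((pack6N n0 n1 n2 n3 n4 n5 &&& 0x1ffffff : Nat) : Int) := by
        exact_mod_cast PySem.Int.band_natCast _ 0x1ffffff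
      rw [hband, show (((pack6N n0 n1 n2 n3 n4 n5 &&& 0x1ffffff : Nat) : Int)) <<< 5
            = (((pack6N n0 n1 n2 n3 n4 n5 &&& 0x1ffffff) <<< 5 : Nat) : Int)
          from (Int.natCast_shiftLeft _ 5).symm,
        hvc]
      rw [show PySem.Int.bxor ((((pack6N n0 n1 n2 n3 n4 n5 &&& 0x1ffffff) <<< 5 : Nat) : Int)) ((m : Nat) : Int)
            = ((((pack6N n0 n1 n2 n3 n4 n5 &&& 0x1ffffff) <<< 5) ^^^ m : Nat) : Int)
          from by exact_mod_cast PySem.Int.bxor_natCast _ m]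
      rw [pack6_mask h1 h2 h3 h4 h5 hm32]
    -- B's step components
    have hc0 : PySem.Int.bxor ((n1 : Nat) : Int) (gf32_mul ((n0 : Nat) : Int) 29)
        = ((n1 ^^^ mulN n0 29 : Nat) : Int) := by
      rw [hg0]; exact_mod_cast PySem.Int.bxor_natCast n1 (mulN n0 29)
    have hc1 : PySem.Int.bxor ((n2 : Nat) : Int) (gf32_mul ((n0 : Nat) : Int) 22)
        = ((n2 ^^^ mulN n0 22 : Nat) : Int) := by
      rw [hg1]; exact_mod_cast PySem.Int.bxor_natCast n2 (mulN n0 22)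
    have hc2 : PySem.Int.bxor ((n3 : Nat) : Int) (gf32_mul ((n0 : Nat) : Int) 20)
        = ((n3 ^^^ mulN n0 20 : Nat) : Int) := by
      rw [hg2]; exact_mod_cast PySem.Int.bxor_natCast n3 (mulN n0 20)
    have hc3 : PySem.Int.bxor ((n4 : Nat) : Int) (gf32_mul ((n0 : Nat) : Int) 21)
        = ((n4 ^^^ mulN n0 21 : Nat) : Int) := by
      rw [hg3]; exact_mod_cast PySem.Int.bxor_natCast n4 (mulN n0 21)
    have hc4 : PySem.Int.bxor ((n5 : Nat) : Int) (gf32_mul ((n0 : Nat) : Int) 29)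
        = ((n5 ^^^ mulN n0 29 : Nat) : Int) := by
      rw [hg0]; exact_mod_cast PySem.Int.bxor_natCast n5 (mulN n0 29)
    have hc5 : PySem.Int.bxor v (gf32_mul ((n0 : Nat) : Int) 18)
        = ((m ^^^ mulN n0 18 : Nat) : Int) := by
      rw [hvc, hg5]; exact_mod_cast PySem.Int.bxor_natCast m (mulN n0 18)
    -- the packed states coincide after one step
    have hpackstep : pack6N n1 n2 n3 n4 n5 m ^^^ TgN n0
        = pack6N (n1 ^^^ mulN n0 29) (n2 ^^^ mulN n0 22) (n3 ^^^ mulN n0 20)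
            (n4 ^^^ mulN n0 21) (n5 ^^^ mulN n0 29) (m ^^^ mulN n0 18) := by
      rw [pack6_xor]; rfl
    simp only [List.foldl_cons]
    have hpackcast : ((pack6N n1 n2 n3 n4 n5 m ^^^ TgN n0 : Nat) : Int)
        = ((pack6N (n1 ^^^ mulN n0 29) (n2 ^^^ mulN n0 22) (n3 ^^^ mulN n0 20)
            (n4 ^^^ mulN n0 21) (n5 ^^^ mulN n0 29) (m ^^^ mulN n0 18) : Nat) : Int) := by
      rw [hpackstep]
    rw [hshr, hchk1, innerA n0 (pack6N n1 n2 n3 n4 n5 m) h0, hpackcast]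
    rw [hc0, hc1, hc2, hc3, hc4, hc5]
    exact ih (n1 ^^^ mulN n0 29) (n2 ^^^ mulN n0 22) (n3 ^^^ mulN n0 20)
      (n4 ^^^ mulN n0 21) (n5 ^^^ mulN n0 29) (m ^^^ mulN n0 18)
      (xor_lt_32 h1 hb0) (xor_lt_32 h2 hb1) (xor_lt_32 h3 hb2)
      (xor_lt_32 h4 hb3) (xor_lt_32 h5 hb0) (xor_lt_32 hm32 hb5)
      (fun w hw => hv w (List.mem_cons_of_mem _ hw))

-- the two polymods agree on lists of 5-bit values
theorem polymod_eq (values : List Int) (h : ∀ v ∈ values, 0 ≤ v ∧ v < 32) :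
    bech32_polymod values = polymod_alt values := by
  unfold bech32_polymod polymod_alt
  have h0 : ((pack6N 0 0 0 0 0 1 : Nat) : Int) = (1 : Int) := by decide
  have := polymod_loop values 0 0 0 0 0 1 (by omega) (by omega) (by omega) (by omega)
    (by omega) (by omega) h
  rw [h0] at this
  exact this

theorem domChar_le (addr : String) (hdom : Dom_bech32_decode addr) (c : Char)
    (hc : c ∈ addr.toList) : c.toNat ≤ 126 := by
  have := List.all_eq_true.mp hdom c hc
  simp only [pvDomChar, Bool.or_eq_true, Bool.and_eq_true, decide_eq_true_eq, beq_iff_eq] at this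
  omega

theorem shift8_zero (c : Char) (h : c.toNat ≤ 126) :
    (((c.toNat : Int) >>> 8) == (0 : Int)) = true := by
  have h1 : c.toNat >>> 8 = 0 := by
    rw [Nat.shiftRight_eq_div_pow]
    omega
  have h2 : ((c.toNat : Int) >>> 8) = ((c.toNat >>> 8 : Nat) : Int) :=
    (Int.natCast_shiftRight _ 8).symm
  rw [h2, h1]
  rfl

theorem routeNone (t0 : Char) (hq : ¬ t0 = 'q') (hp : ¬ t0 = 'p') : ROUTE.get? t0 = none := by
  have h1 : ('q' == t0) = false := by
    simpa using fun h => hq h.symm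
  have h2 : ('p' == t0) = false := by
    simpa using fun h => hp h.symm
  have hR : ROUTE = PySem.Dict.mk [('q', (1 : Int)), ('p', 0x2bc830a3)] := by decide
  have h0 : (PySem.Dict.mk ([] : List (Char × Int))).get? t0 = none := rfl
  simp [hR, PySem.Dict.get?_mk_cons, h1, h2, h0]

-- ===== VERDICT (by name: the statement is the Claim_ definition above) =====
set_option maxHeartbeats 2000000 in
theorem bech32_decode_spec : Claim_equal_bech32_decode := by
  intro addr hdom
  show bech32_decode addr = bech32_decode_alt addr
  unfold bech32_decode bech32_decode_alt
  by_cases hsp : PySem.Str.isIn " " addr = true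
  · rw [hsp]
    simp only [Bool.or_false, Bool.false_or, Bool.or_true, Bool.true_or, Bool.not_false, Bool.not_true, eq_self_iff_true, Bool.false_eq_true, if_true, if_false]
  · simp only [Bool.not_eq_true] at hsp
    rw [hsp]
    simp only [Bool.false_or]
    have hlen : PySem.Str.len addr = (addr.toList.length : Int) := by simp
    by_cases hl8 : PySem.Str.len addr < 8
    · rw [decide_eq_true hl8, decide_eq_false (by omega : ¬ (8 ≤ PySem.Str.len addr ∧ PySem.Str.len addr ≤ 90))]
      simp only [Bool.or_false, Bool.false_or, Bool.or_true, Bool.true_or, Bool.not_false, Bool.not_true, eq_self_iff_true, Bool.false_eq_true, if_true, if_false]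
    · by_cases hl90 : 90 < PySem.Str.len addr
      · rw [decide_eq_false hl8, decide_eq_false (by omega : ¬ (8 ≤ PySem.Str.len addr ∧ PySem.Str.len addr ≤ 90)),
          decide_eq_true (by omega : PySem.Str.len addr > 90)]
        simp only [Bool.or_false, Bool.false_or, Bool.or_true, Bool.true_or, Bool.not_false, Bool.not_true, eq_self_iff_true, Bool.false_eq_true, if_true, if_false]
      · have hrange : 8 ≤ PySem.Str.len addr ∧ PySem.Str.len addr ≤ 90 := by omega
        rw [decide_eq_false hl8, decide_eq_true hrange]
        simp only [Bool.or_false, Bool.false_or, Bool.or_true, Bool.true_or, Bool.not_false, Bool.not_true, eq_self_iff_true, Bool.false_eq_true, if_true, if_false]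
        by_cases hp1 : PySem.Str.rfind addr "1" < 1
        · rw [decide_eq_true hp1]
          simp only [Bool.or_false, Bool.false_or, Bool.or_true, Bool.true_or, Bool.not_false, Bool.not_true, eq_self_iff_true, Bool.false_eq_true, if_true, if_false]
        · by_cases hp7 : PySem.Str.rfind addr "1" + 7 > PySem.Str.len addr
          · rw [decide_eq_true hp7,
              decide_eq_true (by omega : PySem.Str.len addr - PySem.Str.rfind addr "1" < 7),
              decide_eq_false hp1]
            simp only [Bool.or_false, Bool.false_or, Bool.or_true, Bool.true_or, Bool.not_false, Bool.not_true, eq_self_iff_true, Bool.false_eq_true, if_true, if_false]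
          · rw [decide_eq_false hp1, decide_eq_false hp7,
              decide_eq_false (by omega : ¬ (PySem.Str.len addr - PySem.Str.rfind addr "1" < 7)),
              decide_eq_false (by omega : ¬ (PySem.Str.len addr > 90))]
            simp only [Bool.or_false, Bool.false_or, Bool.or_true, Bool.true_or, Bool.not_false, Bool.not_true, eq_self_iff_true, Bool.false_eq_true, if_true, if_false]
            -- main branch
            set pos := PySem.Str.rfind addr "1" with hposdef
            have hpos0 : (0 : Int) ≤ pos := by omega
            have hpos1 : (0 : Int) ≤ pos + 1 := by omega
            have hhrp : (PySem.Str.slice addr none (some pos)).toList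
                = addr.toList.take pos.toNat := by
              simp [PySem.List.slice_to addr.toList hpos0]
            have hpostL : (PySem.Str.slice addr (some (pos + 1)) none).toList
                = addr.toList.drop (pos + 1).toNat := by
              simp [PySem.List.slice_from addr.toList hpos1]
            have hidx : (pos + 1).toNat < addr.toList.length := by omega
            -- ASCII guards hold on the domain
            have hallA : ((PySem.Str.slice addr none (some pos)).toList.all
                fun x => ((x.toNat : Int) >>> 8) == 0) = true := by
              rw [List.all_eq_true]
              intro c hc
              exact shift8_zero c (domChar_le addr hdom c
                (List.mem_of_mem_take (by rwa [hhrp] at hc)))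
            have hallB : ((PySem.Str.slice addr (some (pos + 1)) none).toList.all
                fun x => ((x.toNat : Int) >>> 8) == 0) = true := by
              rw [List.all_eq_true]
              intro c hc
              exact shift8_zero c (domChar_le addr hdom c
                (List.mem_of_mem_drop (by rwa [hpostL] at hc)))
            rw [hallA, hallB]
            simp only [Bool.or_false, Bool.false_or, Bool.or_true, Bool.true_or, Bool.not_false, Bool.not_true, eq_self_iff_true, Bool.false_eq_true, if_true, if_false]
            -- the data loops agree
            rw [dataEq _ []]
            have hmapid : ((PySem.Str.slice addr (some (pos + 1)) none).toList.mapM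
                  (fun c => CHARMAP.get? c)).map (fun l => ([] : List Int) ++ l)
                = (PySem.Str.slice addr (some (pos + 1)) none).toList.mapM
                  (fun c => CHARMAP.get? c) := by
              cases (PySem.Str.slice addr (some (pos + 1)) none).toList.mapM
                  (fun c => CHARMAP.get? c) <;> simp
            rw [hmapid]
            rcases hm : (PySem.Str.slice addr (some (pos + 1)) none).toList.mapM
                (fun c => CHARMAP.get? c) with _ | data
            · rfl
            · -- the routing character
              have ht0A : PySem.Str.pyGet? addr (pos + 1)
                  = some (addr.toList[(pos + 1).toNat]'hidx) := by
                simp only [PySem.Str.pyGet?_eq, PySem.Chars.pyGet?_eq_listPyGet?]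
                rw [PySem.List.pyGet?_eq_some_getElem _ hpos1 (by omega)]
              have ht0B : PySem.Str.pyGet? (PySem.Str.slice addr (some (pos + 1)) none) 0
                  = some (addr.toList[(pos + 1).toNat]'hidx) := by
                simp only [PySem.Str.pyGet?_eq, PySem.Chars.pyGet?_eq_listPyGet?, hpostL]
                rw [PySem.List.pyGet?_zero, List.getElem?_drop]
                simp [List.getElem?_eq_getElem
                  (by omega : (pos + 1).toNat + 0 < addr.toList.length)]
              rw [ht0A, ht0B]
              set t0 := addr.toList[(pos + 1).toNat]'hidx with ht0def
              dsimp only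
              -- the checksum lists and bounds
              set hrp := PySem.Str.slice addr none (some pos) with hhrpdef
              have hlists : bech32_hrp_expand hrp ++ data
                  = hrp.toList.map (fun x => ((x.toNat : Int) >>> 5)) ++ [0] ++
                    hrp.toList.map (fun x => PySem.Int.band (x.toNat : Int) 31) ++ data := by
                unfold bech32_hrp_expand
                simp [List.append_assoc]
              have hbound : ∀ v ∈ hrp.toList.map (fun x => ((x.toNat : Int) >>> 5)) ++ [0] ++
                    hrp.toList.map (fun x => PySem.Int.band (x.toNat : Int) 31) ++ data,
                  0 ≤ v ∧ v < 32 := by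
                intro v hv
                simp only [List.append_assoc, List.mem_append, List.mem_map, List.mem_cons,
                  List.not_mem_nil, or_false] at hv
                rcases hv with ⟨c, hc, rfl⟩ | (rfl | (⟨c, hc, rfl⟩ | hv))
                · have hc126 : c.toNat ≤ 126 := domChar_le addr hdom c
                    (List.mem_of_mem_take (by rwa [hhrpdef, hhrp] at hc))
                  have heq : ((c.toNat : Int) >>> 5) = ((c.toNat >>> 5 : Nat) : Int) :=
                    (Int.natCast_shiftRight c.toNat 5).symm
                  rw [heq]
                  have h5 : c.toNat >>> 5 ≤ 3 := by
                    rw [Nat.shiftRight_eq_div_pow]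
                    omega
                  exact ⟨Int.natCast_nonneg _, by exact_mod_cast by omega⟩
                · norm_num
                · have hb : PySem.Int.band (c.toNat : Int) 31 = ((c.toNat &&& 31 : Nat) : Int) := by
                    exact_mod_cast PySem.Int.band_natCast c.toNat 31
                  rw [hb]
                  have h31 : c.toNat &&& 31 ≤ 31 := Nat.and_le_right
                  exact ⟨Int.natCast_nonneg _, by exact_mod_cast by omega⟩
                · exact dataBound _ data hm v hv
              have hpoly : bech32_polymod (bech32_hrp_expand hrp ++ data)
                  = polymod_alt (hrp.toList.map (fun x => ((x.toNat : Int) >>> 5)) ++ [0] ++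
                    hrp.toList.map (fun x => PySem.Int.band (x.toNat : Int) 31) ++ data) := by
                rw [hlists]
                exact polymod_eq _ hbound
              by_cases hq : t0 = 'q'
              · have hr : ROUTE.get? t0 = some 1 := by rw [hq]; decide
                rw [hr]
                have hqq : ((some t0 == some 'q') : Bool) = true := by
                  rw [hq]; rfl
                rw [hqq]
                simp only [Bool.or_false, Bool.false_or, Bool.or_true, Bool.true_or, Bool.not_false, Bool.not_true, eq_self_iff_true, Bool.false_eq_true, if_true, if_false]
                unfold bech32_verify_checksum
                rw [hpoly]
                by_cases hone : polymod_alt (hrp.toList.map (fun x => ((x.toNat : Int) >>> 5)) ++ [0] ++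
                    hrp.toList.map (fun x => PySem.Int.band (x.toNat : Int) 31) ++ data) = 1
                · simp [hone]
                · simp [hone]
              · by_cases hp : t0 = 'p'
                · have hr : ROUTE.get? t0 = some 0x2bc830a3 := by rw [hp]; decide
                  rw [hr]
                  have hqq : ((some t0 == some 'q') : Bool) = false := by
                    rw [beq_eq_false_iff_ne]; simpa using hq
                  have hpp : ((some t0 == some 'p') : Bool) = true := by
                    rw [hp]; rfl
                  rw [hqq, hpp]
                  simp only [Bool.or_false, Bool.false_or, Bool.or_true, Bool.true_or, Bool.not_false, Bool.not_true, eq_self_iff_true, Bool.false_eq_true, if_true, if_false]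
                  unfold bech32m_verify_checksum
                  rw [hpoly]
                  by_cases hone : polymod_alt (hrp.toList.map (fun x => ((x.toNat : Int) >>> 5)) ++ [0] ++
                      hrp.toList.map (fun x => PySem.Int.band (x.toNat : Int) 31) ++ data) = 0x2bc830a3
                  · simp [hone]
                  · simp [hone]
                · have hr : ROUTE.get? t0 = none := routeNone t0 hq hp
                  rw [hr]
                  have hqq : ((some t0 == some 'q') : Bool) = false := by
                    rw [beq_eq_false_iff_ne]; simpa using hq
                  have hpp : ((some t0 == some 'p') : Bool) = false := by
                    rw [beq_eq_false_iff_ne]; simpa using hp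
                  rw [hqq, hpp]
                  simp only [Bool.or_false, Bool.false_or, Bool.or_true, Bool.true_or, Bool.not_false, Bool.not_true, eq_self_iff_true, Bool.false_eq_true, if_true, if_false]
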